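-- pv_equiv track=rewrite | github.com/dtarg16/LeetCodeSolutions | 2202-maximize-the-topmost-element-after-k-moves/2202-maximize-the-topmost-element-after-k-moves.py | maximumTop
-- ===== SOURCE A (Python) =====
-- from typing import List
--
-- def maximumTop(nums: List[int], k: int) -> int:
--     if k%2 == 1 and len(nums) == 1:
--         return -1
--     maxx = -1
--
--     if k == 0 and len(nums) > 0:
--         return nums[0]
--
--     while k>1:
--         if not nums:
--             return maxx
--         k -= 1
--         top = nums.pop(0)
--         maxx = max(maxx, top)
--
--     if len(nums)>1:
--         return max(maxx, nums[1])
--     return maxx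
-- ===== SOURCE B (Python) =====
-- def maximumTop(nums, k):
--     n = len(nums)
--     if k % 2 == 1 and n == 1:
--         return -1
--     if k == 0 and n > 0:
--         return nums[0]
--     m = min(k - 1, n) if k > 1 else 0
--     maxx = max([-1] + nums[:m])
--     if n - m > 1:
--         return max(maxx, nums[m + 1])
--     return maxx
-- ===== Notes on version B (the rewrite author's own statement) =====
-- stated objective: faster
-- what changed: Replaces A's while-loop that repeatedly pops the list head (O(n) per pop) with a single prefix-max over the first min(k-1, n) elements plus one indexed tail lookup, and leaves nums unmutated.
import Mathlib
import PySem

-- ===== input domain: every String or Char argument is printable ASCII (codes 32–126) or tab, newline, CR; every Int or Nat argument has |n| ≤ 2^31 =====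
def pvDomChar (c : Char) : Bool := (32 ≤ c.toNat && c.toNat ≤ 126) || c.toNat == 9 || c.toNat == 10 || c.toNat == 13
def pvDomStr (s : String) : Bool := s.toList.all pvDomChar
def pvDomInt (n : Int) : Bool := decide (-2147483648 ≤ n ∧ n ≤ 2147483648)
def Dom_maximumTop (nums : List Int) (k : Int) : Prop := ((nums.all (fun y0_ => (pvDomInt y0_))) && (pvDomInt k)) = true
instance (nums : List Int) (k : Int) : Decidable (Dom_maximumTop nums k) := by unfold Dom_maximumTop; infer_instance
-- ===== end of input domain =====

-- B replaces A's quadratic pop(0) loop by a prefix max over the first min(k-1, n)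
-- elements and an indexed tail check (asymptotically faster; no mutation of nums,
-- while A consumes its argument in place — the equivalence is about return values).

-- ===== PORT A =====
-- the 'while k>1' loop of A: pop the head, fold it into maxx, decrement k
def maximumTopLoop (nums : List Int) (k : Int) (maxx : Int) : Int :=
  if k > 1 then
    match nums with
    | [] => maxx
    | top :: rest => maximumTopLoop rest (k - 1) (max maxx top)
  else
    if nums.length > 1 then max maxx ((PySem.List.pyGet? nums 1).getD 0) else maxx

def maximumTop (nums : List Int) (k : Int) : Int :=
  if PySem.Int.mod k 2 == 1 && nums.length == 1 then -1
  else if k == 0 && nums.length > 0 then (PySem.List.pyGet? nums 0).getD 0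
  else maximumTopLoop nums k (-1)

-- ===== PORT B =====
def maximumTop_alt (nums : List Int) (k : Int) : Int :=
  let n : Int := nums.length
  if PySem.Int.mod k 2 == 1 && n == 1 then -1
  else if k == 0 && n > 0 then (PySem.List.pyGet? nums 0).getD 0
  else
    let m : Int := if k > 1 then min (k - 1) n else 0
    -- max([-1] + nums[:m]) : fold max over the prefix starting from -1
    let maxx : Int := (PySem.List.slice nums none (some m)).foldl max (-1)
    if n - m > 1 then max maxx ((PySem.List.pyGet? nums (m + 1)).getD 0) else maxx

-- ===== PRECONDITION & SPEC =====
def Spec_maximumTop (nums : List Int) (k : Int) (out : Int) : Prop := out = maximumTop_alt nums k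
instance (nums : List Int) (k : Int) (out : Int) : Decidable (Spec_maximumTop nums k out) := by unfold Spec_maximumTop; infer_instance

-- ===== CLAIM (what is proved, stated in full; the proofs are below) =====
def Claim_equal_maximumTop : Prop := ∀ (nums : List Int) (k : Int), Dom_maximumTop nums k → Spec_maximumTop nums k (maximumTop nums k)

-- ===== LEMMAS AND PROOFS =====

-- closed form of A's loop: prefix max over the first m = min(k-1, n) elements
def pvClosed (nums : List Int) (k maxx : Int) : Int :=
  if (nums.length : Int) - (if k > 1 then min (k - 1) (nums.length : Int) else 0) > 1 then
    max ((nums.take (if k > 1 then min (k - 1) (nums.length : Int) else 0).toNat).foldl max maxx)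
      ((PySem.List.pyGet? nums ((if k > 1 then min (k - 1) (nums.length : Int) else 0) + 1)).getD 0)
  else (nums.take (if k > 1 then min (k - 1) (nums.length : Int) else 0).toNat).foldl max maxx

theorem loop_eq_closed (nums : List Int) : ∀ (k maxx : Int),
    maximumTopLoop nums k maxx = pvClosed nums k maxx := by
  induction nums with
  | nil =>
    intro k maxx
    unfold maximumTopLoop pvClosed
    by_cases hk : k > 1 <;> simp [hk] <;> omega
  | cons t rest ih =>
    intro k maxx
    by_cases hk : k > 1
    · rw [maximumTopLoop]
      simp only [hk, if_pos]
      rw [ih]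
      unfold pvClosed
      have hk2 : k - 1 > 1 ∨ k - 1 ≤ 1 := by omega
      set n : Int := (rest.length : Int) with hn
      have hms : (if k - 1 > 1 then min (k - 1 - 1) n else 0) = min (k - 2) n := by
        split_ifs with h
        · omega
        · have : (0:Int) ≤ n := by simp [hn]
          omega
      have hnn : (0:Int) ≤ n := by simp [hn]
      have hmb : (if k > 1 then min (k - 1) (((t :: rest).length : Int)) else 0)
          = min (k - 2) n + 1 := by
        simp only [hk, if_pos, List.length_cons]
        push_cast
        omega
      simp only [hms, hmb]
      have htn : (min (k - 2) n + 1).toNat = (min (k - 2) n).toNat + 1 := by omega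
      have htake : (t :: rest).take ((min (k - 2) n + 1).toNat)
          = t :: rest.take ((min (k - 2) n).toNat) := by
        rw [htn, List.take_succ_cons]
      have hget : PySem.List.pyGet? (t :: rest) (min (k - 2) n + 1 + 1)
          = PySem.List.pyGet? rest (min (k - 2) n + 1) := by
        have e1 : min (k - 2) n + 1 + 1 = (((min (k - 2) n).toNat + 2 : Nat) : Int) := by
          push_cast; omega
        have e2 : min (k - 2) n + 1 = (((min (k - 2) n).toNat + 1 : Nat) : Int) := by
          push_cast; omega
        rw [e1, e2, PySem.List.pyGet?_natCast, PySem.List.pyGet?_natCast]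
        simp
      have hcond : ((((t :: rest).length : Int)) - (min (k - 2) n + 1) > 1)
          ↔ (n - min (k - 2) n > 1) := by
        simp only [List.length_cons]
        push_cast
        omega
      simp only [htake, hget, List.foldl_cons]
      by_cases hc : n - min (k - 2) n > 1
      · rw [if_pos hc, if_pos (hcond.mpr hc)]
      · rw [if_neg hc, if_neg (fun h => hc (hcond.mp h))]
    · rw [maximumTopLoop]
      simp only [hk, if_false]
      unfold pvClosed
      simp only [hk, if_false]
      simp [List.length_cons]

theorem slice_eq_take (nums : List Int) (m : Int) (hm : 0 ≤ m) :
    PySem.List.slice nums none (some m) = nums.take m.toNat := by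
  have h : m = ((m.toNat : Nat) : Int) := by omega
  conv_lhs => rw [h]
  rw [PySem.List.slice_to_natCast]

-- ===== VERDICT (by name: the statement is the Claim_ definition above) =====
theorem alt_eq (nums : List Int) (k : Int) : maximumTop_alt nums k =
    if (PySem.Int.mod k 2 == 1 && (nums.length : Int) == 1) = true then -1
    else if (k == 0 && decide ((nums.length : Int) > 0)) = true then
      (PySem.List.pyGet? nums 0).getD 0
    else
      if (nums.length : Int) - (if k > 1 then min (k - 1) (nums.length : Int) else 0) > 1 then
        max (((PySem.List.slice nums none
              (some (if k > 1 then min (k - 1) (nums.length : Int) else 0)))).foldl max (-1))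
          ((PySem.List.pyGet? nums
              ((if k > 1 then min (k - 1) (nums.length : Int) else 0) + 1)).getD 0)
      else ((PySem.List.slice nums none
              (some (if k > 1 then min (k - 1) (nums.length : Int) else 0)))).foldl max (-1) := rfl

theorem maximumTop_spec : Claim_equal_maximumTop := by
  intro nums k _
  unfold Spec_maximumTop maximumTop
  rw [alt_eq, loop_eq_closed]
  unfold pvClosed
  have hm0 : (0:Int) ≤ (if k > 1 then min (k - 1) ((nums.length : Int)) else 0) := by
    split_ifs with h
    · have : (0:Int) ≤ (nums.length : Int) := by positivity
      omega
    · omega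
  rw [slice_eq_take _ _ hm0]
  have c1 : (nums.length == 1) = (((nums.length : Int)) == 1) := by
    by_cases h : nums.length = 1 <;> simp [h]
  have c2 : (decide (nums.length > 0)) = (decide (((nums.length : Int)) > 0)) := by
    by_cases h : nums.length > 0 <;> simp [h]
  rw [c1, c2]
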